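-- pv_equiv track=rewrite | github.com/ShivamSainier/Competitive-programming | Facing_the_sun.py | buildings
-- ===== SOURCE A (Python) =====
-- def buildings(sun):
--     j=1
--     k=sun[0]
--     for i in range(0,len(sun)):
--         if sun[i]>k:
--             k=sun[i]
--             j=j+1
--     return j
-- ===== SOURCE B (Python) =====
-- def buildings(sun):
--     # Build the running-maximum prefix table, then count its distinct values.
--     prefix_max = sun[:1]
--     for x in sun[1:]:
--         prefix_max.append(max(prefix_max[-1], x))
--     return len(set(prefix_max))
-- ===== Notes on version B (the rewrite author's own statement) =====
-- stated objective: idiomatic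
-- what changed: B builds the running-maximum prefix table and returns the number of distinct values in it, instead of A's in-line counter-plus-running-max-variable loop.
import Mathlib
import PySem

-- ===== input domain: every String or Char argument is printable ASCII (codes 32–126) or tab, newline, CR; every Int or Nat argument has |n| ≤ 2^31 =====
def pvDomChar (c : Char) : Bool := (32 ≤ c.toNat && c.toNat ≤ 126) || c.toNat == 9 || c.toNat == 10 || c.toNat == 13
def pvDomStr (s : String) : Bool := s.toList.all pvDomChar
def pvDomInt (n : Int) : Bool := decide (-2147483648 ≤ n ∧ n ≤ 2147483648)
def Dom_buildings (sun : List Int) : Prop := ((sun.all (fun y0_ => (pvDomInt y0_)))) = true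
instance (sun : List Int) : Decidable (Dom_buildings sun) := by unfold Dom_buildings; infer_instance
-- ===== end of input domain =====

-- B replaces A's counter-and-running-max loop by a prefix-maximum table whose distinct values are counted; equivalence of the RETURN value is what is proved.

-- ===== PORT A =====
-- the for-loop over range(0,len(sun)) indexing sun[i] is the fold over sun with state (j, k)
def buildings (sun : List Int) : Int :=
  match sun with
  | [] => 0   -- unreachable under Pre_buildings: Python raises IndexError at sun[0]
  | s0 :: _ =>
    (sun.foldl (fun (jk : Int × Int) x => if x > jk.2 then (jk.1 + 1, x) else jk) (1, s0)).1

-- ===== PORT B =====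
-- prefix_max is kept head-first (the loop appends and reads prefix_max[-1], here cons and headI);
-- len(set(...)) is (PySem.Set.ofList ...).length, which is order-insensitive.
def buildings_alt (sun : List Int) : Int :=
  let prefixMax : List Int :=
    match sun with
    | [] => []
    | s0 :: rest => rest.foldl (fun acc x => (max acc.headI x) :: acc) [s0]
  ((PySem.Set.ofList prefixMax).length : Int)

-- ===== PRECONDITION & SPEC =====
-- Pre_ excludes only the empty list, on which A raises IndexError (sun[0]).
def Pre_buildings (sun : List Int) : Prop := sun ≠ []
instance (sun : List Int) : Decidable (Pre_buildings sun) := by unfold Pre_buildings; infer_instance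
def pvWitness_buildings : List Int := ([3, 1, 4])

def Spec_buildings (sun : List Int) (out : Int) : Prop := out = buildings_alt sun
instance (sun : List Int) (out : Int) : Decidable (Spec_buildings sun out) := by unfold Spec_buildings; infer_instance

-- ===== CLAIM (what is proved, stated in full; the proofs are below) =====
def Claim_equal_buildings : Prop := ∀ (sun : List Int), Dom_buildings sun → Pre_buildings sun → Spec_buildings sun (buildings sun)

-- ===== LEMMAS AND PROOFS =====

-- the distinct count of a list (len(set(l))) is its toFinset card
lemma ofList_length_eq_card (l : List Int) :
    ((PySem.Set.ofList l).length : Int) = (l.toFinset.card : Int) := by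
  have hnd : (PySem.Set.ofList l).Nodup := PySem.Set.nodup_ofList l
  have hfin : (PySem.Set.ofList l).toFinset = l.toFinset := by
    ext x; simp [PySem.Set.mem_ofList]
  have : (PySem.Set.ofList l).length = l.toFinset.card := by
    rw [← List.toFinset_card_of_nodup hnd, hfin]
  exact_mod_cast this

-- loop invariant relating A's (j, k) state to B's prefix-max accumulator
lemma loop_inv (rest : List Int) : ∀ (j k : Int) (acc : List Int),
    acc ≠ [] → acc.headI = k → (∀ y ∈ acc, y ≤ k) → j = (acc.toFinset.card : Int) →
    (rest.foldl (fun (jk : Int × Int) x => if x > jk.2 then (jk.1 + 1, x) else jk) (j, k)).1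
      = ((rest.foldl (fun acc x => (max acc.headI x) :: acc) acc).toFinset.card : Int) := by
  induction rest with
  | nil => intro j k acc _ _ _ hj; simpa using hj
  | cons x rest ih =>
    intro j k acc hne hhd hle hj
    simp only [List.foldl_cons]
    by_cases hx : x > k
    · have hmax : max acc.headI x = x := by rw [hhd]; exact max_eq_right (le_of_lt hx)
      rw [if_pos hx, hmax]
      refine ih (j + 1) x (x :: acc) (by simp) (by simp) ?_ ?_
      · intro y hy
        rcases List.mem_cons.mp hy with h | h
        · exact le_of_eq h
        · exact le_trans (hle y h) (le_of_lt hx)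
      · have hnotmem : x ∉ acc := fun h => absurd (hle x h) (not_le.mpr hx)
        have : (x :: acc).toFinset.card = acc.toFinset.card + 1 := by
          rw [List.toFinset_cons, Finset.card_insert_of_notMem (by simpa using hnotmem)]
        rw [this]; push_cast; omega
    · have hxk : x ≤ k := le_of_not_gt hx
      have hmax : max acc.headI x = k := by rw [hhd]; exact max_eq_left hxk
      rw [if_neg hx, hmax]
      have hkmem : k ∈ acc := by
        cases acc with
        | nil => exact absurd rfl hne
        | cons a t => simp at hhd; rw [← hhd]; exact List.mem_cons_self
      refine ih j k (k :: acc) (by simp) (by simp) ?_ ?_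
      · intro y hy
        rcases List.mem_cons.mp hy with h | h
        · exact le_of_eq h
        · exact hle y h
      · rw [List.toFinset_cons, Finset.insert_eq_self.mpr (by simpa using hkmem)]
        exact hj

-- ===== VERDICT (by name: the statement is the Claim_ definition above) =====
theorem buildings_spec : Claim_equal_buildings := by
  intro sun _ hpre
  unfold Spec_buildings buildings buildings_alt
  match sun with
  | [] => exact absurd rfl hpre
  | s0 :: rest =>
    simp only [List.foldl_cons, if_neg (lt_irrefl s0)]
    rw [ofList_length_eq_card]
    exact loop_inv rest 1 s0 [s0] (by simp) (by simp) (by simp) (by simp)
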